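-- pv_equiv track=rewrite | github.com/wrpearson/fasta36 | scripts/map_exon_coords.py | map_coords
-- ===== SOURCE A (Python) =====
-- def map_coords(from_coords, to_coords, coord_list):
--
--     mapped_coords = []
--
--     fx = 0
--     mx = 0
--     while mx < len(coord_list):
--         this_from_coord = coord_list[mx]
--         while (from_coords[fx] < this_from_coord):
--             fx += 1
--             continue
--
--         mapped_coords.append(to_coords[fx])
--         mx += 1
--
--     return mapped_coords
-- ===== SOURCE B (Python) =====
-- def map_coords(from_coords, to_coords, coord_list):
--     # Prefix maxima of from_coords form a non-decreasing array, so each query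
--     # can be answered by a binary search that starts at the running pointer fx.
--     env = []
--     m = None
--     for v in from_coords:
--         m = v if m is None or v > m else m
--         env.append(m)
--     mapped_coords = []
--     fx = 0
--     for c in coord_list:
--         lo, hi = fx, len(env)
--         while lo < hi:
--             mid = (lo + hi) // 2
--             if env[mid] < c:
--                 lo = mid + 1
--             else:
--                 hi = mid
--         fx = lo
--         mapped_coords.append(to_coords[fx])
--     return mapped_coords
-- ===== Notes on version B (the rewrite author's own statement) =====
-- stated objective: alternative
-- what changed: B precomputes the prefix-maxima array of from_coords once and answers each query with a binary search starting at the running pointer, instead of A's nested while-loop that advances the pointer one element at a time.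
import Mathlib
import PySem

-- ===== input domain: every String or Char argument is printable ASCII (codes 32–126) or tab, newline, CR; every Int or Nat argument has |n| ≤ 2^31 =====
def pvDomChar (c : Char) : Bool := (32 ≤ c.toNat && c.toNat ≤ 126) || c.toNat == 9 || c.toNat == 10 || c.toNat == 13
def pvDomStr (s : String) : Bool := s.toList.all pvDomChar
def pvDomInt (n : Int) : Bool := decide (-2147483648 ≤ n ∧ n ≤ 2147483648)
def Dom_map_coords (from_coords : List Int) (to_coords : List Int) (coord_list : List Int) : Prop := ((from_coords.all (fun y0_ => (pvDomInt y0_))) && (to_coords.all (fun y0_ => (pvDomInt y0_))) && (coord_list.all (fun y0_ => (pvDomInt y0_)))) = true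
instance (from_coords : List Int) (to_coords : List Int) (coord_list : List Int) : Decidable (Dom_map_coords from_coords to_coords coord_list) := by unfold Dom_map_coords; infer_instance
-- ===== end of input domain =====

-- B replaces A's stateful linear pointer advance by a precomputed prefix-maxima
-- array queried with a binary search (objective: alternative algorithm, not faster).

-- ===== PORT A =====
-- inner `while from_coords[fx] < this_from_coord: fx += 1`
def scanA (f : List Int) (c : Int) (fx : Nat) : Nat :=
  if h : fx < f.length then
    if f.getD fx 0 < c then scanA f c (fx + 1) else fx
  else fx  -- Python raises IndexError here; excluded by Pre_
termination_by f.length - fx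

-- outer while over coord_list, carrying fx
def goA (f t : List Int) : List Int → Nat → List Int
  | [], _ => []
  | c :: rest, fx =>
    let fx' := scanA f c fx
    t.getD fx' 0 :: goA f t rest fx'  -- Python raises if fx' out of range; excluded by Pre_

def map_coords (from_coords : List Int) (to_coords : List Int) (coord_list : List Int) : List Int :=
  goA from_coords to_coords coord_list 0

-- ===== PORT B =====
-- the `for v in from_coords` loop building env (running maximum)
def envLoop : List Int → Option Int → List Int
  | [], _ => []
  | v :: rest, m =>
    let m' := match m with
      | none => v
      | some mv => if v > mv then v else mv
    m' :: envLoop rest (some m')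

-- the hand-written `while lo < hi` binary search of Source B
def bisectLeft (a : List Int) (x : Int) (lo hi : Nat) : Nat :=
  -- mid = (lo + hi) // 2, written inline
  if _h : lo < hi then
    if a.getD ((lo + hi) / 2) 0 < x then bisectLeft a x ((lo + hi) / 2 + 1) hi
    else bisectLeft a x lo ((lo + hi) / 2)
  else lo
termination_by hi - lo
decreasing_by all_goals omega

-- the `for c in coord_list` loop, carrying fx
def goB (t e : List Int) : List Int → Nat → List Int
  | [], _ => []
  | c :: rest, fx =>
    let fx' := bisectLeft e c fx e.length
    t.getD fx' 0 :: goB t e rest fx'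

def map_coords_alt (from_coords : List Int) (to_coords : List Int) (coord_list : List Int) : List Int :=
  goB to_coords (envLoop from_coords none) coord_list 0

-- ===== PRECONDITION & SPEC =====
-- Exactly the inputs on which the Python A returns (no IndexError): every queried
-- coordinate is ≤ some from_coords entry whose index is also a valid to_coords index.
def Pre_map_coords (from_coords : List Int) (to_coords : List Int) (coord_list : List Int) : Prop :=
  (coord_list.all fun c => (from_coords.take to_coords.length).any fun v => decide (c ≤ v)) = true

instance (from_coords : List Int) (to_coords : List Int) (coord_list : List Int) : Decidable (Pre_map_coords from_coords to_coords coord_list) := by unfold Pre_map_coords; infer_instance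

def pvWitness_map_coords : List Int × List Int × List Int := ([5, 10], [100, 200], [3, 7])

def Spec_map_coords (from_coords : List Int) (to_coords : List Int) (coord_list : List Int) (out : List Int) : Prop := out = map_coords_alt from_coords to_coords coord_list
instance (from_coords : List Int) (to_coords : List Int) (coord_list : List Int) (out : List Int) : Decidable (Spec_map_coords from_coords to_coords coord_list out) := by unfold Spec_map_coords; infer_instance

-- ===== CLAIM (what is proved, stated in full; the proofs are below) =====
def Claim_equal_map_coords : Prop := ∀ (from_coords : List Int) (to_coords : List Int) (coord_list : List Int), Dom_map_coords from_coords to_coords coord_list → Pre_map_coords from_coords to_coords coord_list → Spec_map_coords from_coords to_coords coord_list (map_coords from_coords to_coords coord_list)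

-- ===== LEMMAS AND PROOFS =====

lemma envLoop_length (f : List Int) (m : Option Int) : (envLoop f m).length = f.length := by
  induction f generalizing m with
  | nil => simp [envLoop]
  | cons v rest ih => simp [envLoop, ih]

-- master lemma on envLoop with a `some` accumulator
lemma env_master (f : List Int) (m : Int) (i : Nat) (hi : i < f.length) :
    m ≤ (envLoop f (some m)).getD i 0
    ∧ (∀ j, j ≤ i → f.getD j 0 ≤ (envLoop f (some m)).getD i 0)
    ∧ ((envLoop f (some m)).getD i 0 = m ∨ ∃ j, j ≤ i ∧ (envLoop f (some m)).getD i 0 = f.getD j 0) := by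
  induction f generalizing m i with
  | nil => simp at hi
  | cons v rest ih =>
    simp only [envLoop]
    cases i with
    | zero =>
      refine ⟨?_, ?_, ?_⟩
      · simp only [List.getD_cons_zero]; split <;> omega
      · intro j hj; interval_cases j
        simp only [List.getD_cons_zero]; split <;> omega
      · simp only [List.getD_cons_zero]
        split
        · exact Or.inr ⟨0, le_refl _, rfl⟩
        · exact Or.inl rfl
    | succ i =>
      have hi' : i < rest.length := by simp at hi; omega
      obtain ⟨g1, g2, g3⟩ := ih (m := if v > m then v else m) i hi'
      simp only [List.getD_cons_succ]
      refine ⟨?_, ?_, ?_⟩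
      · refine le_trans ?_ g1; split <;> omega
      · intro j hj
        cases j with
        | zero =>
          simp only [List.getD_cons_zero]
          refine le_trans ?_ g1; split <;> omega
        | succ j => simpa using g2 j (by omega)
      · rcases g3 with h | ⟨j, hj, hje⟩
        · rw [h]; split
          · exact Or.inr ⟨0, by omega, by simp⟩
          · exact Or.inl rfl
        · exact Or.inr ⟨j + 1, by omega, by simpa using hje⟩

lemma env_none_ub (f : List Int) (i j : Nat) (hj : j ≤ i) (hi : i < f.length) :
    f.getD j 0 ≤ (envLoop f none).getD i 0 := by
  cases f with
  | nil => simp at hi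
  | cons v rest =>
    simp only [envLoop]
    cases i with
    | zero => interval_cases j; simp
    | succ i =>
      have hi' : i < rest.length := by simp at hi; omega
      obtain ⟨g1, g2, _⟩ := env_master rest v i hi'
      cases j with
      | zero => simpa using g1
      | succ j => simpa using g2 j (by omega)

lemma env_none_wit (f : List Int) (i : Nat) (hi : i < f.length) :
    ∃ j, j ≤ i ∧ (envLoop f none).getD i 0 = f.getD j 0 := by
  cases f with
  | nil => simp at hi
  | cons v rest =>
    simp only [envLoop]
    cases i with
    | zero => exact ⟨0, le_refl _, by simp⟩
    | succ i =>
      have hi' : i < rest.length := by simp at hi; omega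
      obtain ⟨_, _, g3⟩ := env_master rest v i hi'
      rcases g3 with h | ⟨j, hj, hje⟩
      · exact ⟨0, by omega, by simpa using h⟩
      · exact ⟨j + 1, by omega, by simpa using hje⟩

lemma env_some_sorted (f : List Int) (m : Int) (i k : Nat) (hik : i ≤ k) (hk : k < f.length) :
    (envLoop f (some m)).getD i 0 ≤ (envLoop f (some m)).getD k 0 := by
  induction f generalizing m i k with
  | nil => simp at hk
  | cons v rest ih =>
    simp only [envLoop]
    cases i with
    | zero =>
      cases k with
      | zero => exact le_refl _
      | succ k =>
        have hk' : k < rest.length := by simp at hk; omega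
        obtain ⟨g1, _, _⟩ := env_master rest (if v > m then v else m) k hk'
        simpa using g1
    | succ i =>
      cases k with
      | zero => omega
      | succ k =>
        have hk' : k < rest.length := by simp at hk; omega
        simpa using ih (m := if v > m then v else m) i k (by omega) hk'

lemma env_none_sorted (f : List Int) (i k : Nat) (hik : i ≤ k) (hk : k < f.length) :
    (envLoop f none).getD i 0 ≤ (envLoop f none).getD k 0 := by
  cases f with
  | nil => simp at hk
  | cons v rest =>
    simp only [envLoop]
    cases i with
    | zero =>
      cases k with
      | zero => exact le_refl _
      | succ k =>
        have hk' : k < rest.length := by simp at hk; omega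
        obtain ⟨g1, _, _⟩ := env_master rest v k hk'
        simpa using g1
    | succ i =>
      cases k with
      | zero => omega
      | succ k =>
        have hk' : k < rest.length := by simp at hk; omega
        simpa using env_some_sorted rest v i k (by omega) hk'

lemma scanA_spec (f : List Int) (c : Int) (fx : Nat) (h : fx ≤ f.length) :
    fx ≤ scanA f c fx ∧ scanA f c fx ≤ f.length
    ∧ (∀ j, fx ≤ j → j < scanA f c fx → f.getD j 0 < c)
    ∧ (scanA f c fx < f.length → c ≤ f.getD (scanA f c fx) 0) := by
  have H : ∀ (n fx : Nat), fx ≤ f.length → f.length - fx ≤ n →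
      fx ≤ scanA f c fx ∧ scanA f c fx ≤ f.length
      ∧ (∀ j, fx ≤ j → j < scanA f c fx → f.getD j 0 < c)
      ∧ (scanA f c fx < f.length → c ≤ f.getD (scanA f c fx) 0) := by
    intro n
    induction n with
    | zero =>
      intro fx h1 h2
      have hfx : ¬ fx < f.length := by omega
      rw [scanA]
      rw [dif_neg hfx]
      exact ⟨le_refl _, h1, fun j h3 h4 => by omega, fun h => by omega⟩
    | succ n ih =>
      intro fx h1 h2
      by_cases hfx : fx < f.length
      · rw [scanA]
        rw [dif_pos hfx]
        by_cases hlt : f.getD fx 0 < c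
        · rw [if_pos hlt]
          obtain ⟨i1, i2, i3, i4⟩ := ih (fx + 1) (by omega) (by omega)
          refine ⟨by omega, i2, ?_, i4⟩
          intro j h3 h4
          by_cases hj : j = fx
          · rwa [hj]
          · exact i3 j (by omega) h4
        · rw [if_neg hlt]
          exact ⟨le_refl _, by omega, fun j h3 h4 => by omega, fun _ => not_lt.mp hlt⟩
      · rw [scanA]
        rw [dif_neg hfx]
        exact ⟨le_refl _, h1, fun j h3 h4 => by omega, fun h => by omega⟩
  exact H f.length fx h (by omega)

lemma bisect_spec (a : List Int) (x : Int)
    (hs : ∀ i k, i ≤ k → k < a.length → a.getD i 0 ≤ a.getD k 0)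
    (lo hi : Nat) (hlh : lo ≤ hi) (hha : hi ≤ a.length) :
    lo ≤ bisectLeft a x lo hi ∧ bisectLeft a x lo hi ≤ hi
    ∧ (∀ j, lo ≤ j → j < bisectLeft a x lo hi → a.getD j 0 < x)
    ∧ (bisectLeft a x lo hi < hi → x ≤ a.getD (bisectLeft a x lo hi) 0) := by
  have H : ∀ (n lo hi : Nat), lo ≤ hi → hi ≤ a.length → hi - lo ≤ n →
      lo ≤ bisectLeft a x lo hi ∧ bisectLeft a x lo hi ≤ hi
      ∧ (∀ j, lo ≤ j → j < bisectLeft a x lo hi → a.getD j 0 < x)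
      ∧ (bisectLeft a x lo hi < hi → x ≤ a.getD (bisectLeft a x lo hi) 0) := by
    intro n
    induction n with
    | zero =>
      intro lo hi h1 h2 h3
      have hlo : ¬ lo < hi := by omega
      rw [bisectLeft]
      rw [dif_neg hlo]
      exact ⟨le_refl _, h1, fun j h4 h5 => by omega, fun h => by omega⟩
    | succ n ih =>
      intro lo hi h1 h2 h3
      by_cases hlo : lo < hi
      · rw [bisectLeft]
        rw [dif_pos hlo]
        by_cases hmid : a.getD ((lo + hi) / 2) 0 < x
        · rw [if_pos hmid]
          obtain ⟨i1, i2, i3, i4⟩ := ih ((lo + hi) / 2 + 1) hi (by omega) h2 (by omega)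
          refine ⟨by omega, i2, ?_, i4⟩
          intro j h4 h5
          by_cases hj : j ≤ (lo + hi) / 2
          · exact lt_of_le_of_lt (hs j ((lo + hi) / 2) hj (by omega)) hmid
          · exact i3 j (by omega) h5
        · rw [if_neg hmid]
          obtain ⟨i1, i2, i3, i4⟩ := ih lo ((lo + hi) / 2) (by omega) (by omega) (by omega)
          refine ⟨i1, by omega, i3, ?_⟩
          intro h4
          by_cases hr : bisectLeft a x lo ((lo + hi) / 2) < (lo + hi) / 2
          · exact i4 hr
          · have : bisectLeft a x lo ((lo + hi) / 2) = (lo + hi) / 2 := by omega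
            rw [this]
            exact not_lt.mp hmid
      · rw [bisectLeft]
        rw [dif_neg hlo]
        exact ⟨le_refl _, h1, fun j h4 h5 => by omega, fun h => by omega⟩
  exact H a.length lo hi hlh hha (by omega)

-- one step: scanA agrees with the binary search on env, and the invariant is preserved
lemma step_eq (f t : List Int) (c : Int) (fx : Nat)
    (hInv : fx = 0 ∨ (fx < f.length ∧ fx < t.length ∧ ∀ j, j < fx → f.getD j 0 ≤ f.getD fx 0))
    (hc : ∃ j, j < f.length ∧ j < t.length ∧ c ≤ f.getD j 0) :
    scanA f c fx = bisectLeft (envLoop f none) c fx (envLoop f none).length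
    ∧ scanA f c fx < f.length ∧ scanA f c fx < t.length
    ∧ (∀ j, j < scanA f c fx → f.getD j 0 ≤ f.getD (scanA f c fx) 0) := by
  obtain ⟨j0, hj0f, hj0t, hj0c⟩ := hc
  have hfx : fx < f.length := by
    rcases hInv with h0 | ⟨h, _, _⟩
    · omega
    · exact h
  have hmono : ∀ j, j < fx → f.getD j 0 ≤ f.getD fx 0 := by
    rcases hInv with h0 | ⟨_, _, h⟩
    · intro j hj; omega
    · exact h
  obtain ⟨s1, s2, s3, s4⟩ := scanA_spec f c fx (le_of_lt hfx)
  -- if the scan ever reaches fx with f[fx] ≥ c it stops there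
  have hstay : c ≤ f.getD fx 0 → scanA f c fx = fx := by
    intro hge
    by_contra hne
    exact absurd (s3 fx (le_refl _) (by omega)) (not_lt.mpr hge)
  have hr1ft : scanA f c fx < f.length ∧ scanA f c fx < t.length := by
    by_cases hj0fx : fx ≤ j0
    · have hle : scanA f c fx ≤ j0 := by
        by_contra h'
        exact absurd (s3 j0 hj0fx (by omega)) (not_lt.mpr hj0c)
      omega
    · have hcfx : c ≤ f.getD fx 0 := le_trans hj0c (hmono j0 (by omega))
      have heq := hstay hcfx
      have hfxt : fx < t.length := by
        rcases hInv with h0 | ⟨_, h, _⟩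
        · omega
        · exact h
      omega
  obtain ⟨hr1f, hr1t⟩ := hr1ft
  have hstop : c ≤ f.getD (scanA f c fx) 0 := s4 hr1f
  have lenE : (envLoop f none).length = f.length := envLoop_length f none
  have hs : ∀ i k, i ≤ k → k < (envLoop f none).length →
      (envLoop f none).getD i 0 ≤ (envLoop f none).getD k 0 := by
    intro i k hik hk
    exact env_none_sorted f i k hik (by omega)
  obtain ⟨b1, b2, b3, b4⟩ :=
    bisect_spec (envLoop f none) c hs fx (envLoop f none).length (by omega) (le_refl _)
  have heq : scanA f c fx = bisectLeft (envLoop f none) c fx (envLoop f none).length := by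
    have hle1 : bisectLeft (envLoop f none) c fx (envLoop f none).length ≤ scanA f c fx := by
      by_contra h'
      have he1 : c ≤ (envLoop f none).getD (scanA f c fx) 0 :=
        le_trans hstop (env_none_ub f (scanA f c fx) (scanA f c fx) (le_refl _) hr1f)
      exact absurd (b3 (scanA f c fx) s1 (by omega)) (not_lt.mpr he1)
    have hle2 : scanA f c fx ≤ bisectLeft (envLoop f none) c fx (envLoop f none).length := by
      by_contra h'
      have hr2f : bisectLeft (envLoop f none) c fx (envLoop f none).length < f.length := by omega
      have hc2 : c ≤ (envLoop f none).getD (bisectLeft (envLoop f none) c fx (envLoop f none).length) 0 :=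
        b4 (by omega)
      obtain ⟨j, hjle, hje⟩ := env_none_wit f (bisectLeft (envLoop f none) c fx (envLoop f none).length) hr2f
      have hcj : c ≤ f.getD j 0 := hje ▸ hc2
      by_cases hjfx : fx ≤ j
      · exact absurd (s3 j hjfx (by omega)) (not_lt.mpr hcj)
      · have hcfx : c ≤ f.getD fx 0 := le_trans hcj (hmono j (by omega))
        have := hstay hcfx
        omega
    omega
  refine ⟨heq, hr1f, hr1t, ?_⟩
  intro j hj
  by_cases hjfx : fx ≤ j
  · exact le_trans (le_of_lt (s3 j hjfx hj)) hstop
  · refine le_trans (hmono j (by omega)) ?_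
    by_cases hfr : scanA f c fx = fx
    · rw [hfr]
    · exact le_trans (le_of_lt (s3 fx (le_refl _) (by omega))) hstop

lemma go_eq (f t : List Int) (cl : List Int) (fx : Nat)
    (hInv : fx = 0 ∨ (fx < f.length ∧ fx < t.length ∧ ∀ j, j < fx → f.getD j 0 ≤ f.getD fx 0))
    (hpre : ∀ c ∈ cl, ∃ j, j < f.length ∧ j < t.length ∧ c ≤ f.getD j 0) :
    goA f t cl fx = goB t (envLoop f none) cl fx := by
  induction cl generalizing fx with
  | nil => rfl
  | cons c rest ih =>
    obtain ⟨heq, h1, h2, h3⟩ := step_eq f t c fx hInv (hpre c (by simp))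
    simp only [goA, goB, ← heq]
    rw [ih _ (Or.inr ⟨h1, h2, h3⟩) (fun c' hc' => hpre c' (by simp [hc']))]

lemma pre_elem (f t : List Int) (c : Int)
    (h : ((f.take t.length).any fun v => decide (c ≤ v)) = true) :
    ∃ j, j < f.length ∧ j < t.length ∧ c ≤ f.getD j 0 := by
  simp only [List.any_eq_true, decide_eq_true_eq] at h
  obtain ⟨v, hv, hcv⟩ := h
  rw [List.mem_iff_getElem] at hv
  obtain ⟨i, hlen, hval⟩ := hv
  have hlen' : i < f.length ∧ i < t.length := by
    have := List.length_take_le t.length f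
    simp [List.length_take] at hlen
    omega
  refine ⟨i, hlen'.1, hlen'.2, ?_⟩
  rw [List.getD_eq_getElem f 0 hlen'.1]
  rw [List.getElem_take] at hval
  exact hval ▸ hcv

-- ===== VERDICT (by name: the statement is the Claim_ definition above) =====
theorem map_coords_spec : Claim_equal_map_coords := by
  intro f t cl _ hpre
  unfold Spec_map_coords map_coords map_coords_alt
  refine go_eq f t cl 0 (Or.inl rfl) ?_
  intro c hc
  exact pre_elem f t c (by simpa using (List.all_eq_true.mp hpre c hc))
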